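-- pv_equiv track=rewrite | github.com/cuioss/plan-marshall | marketplace/bundles/pm-plugin-development/skills/plugin-doctor/scripts/_analyze_verb_chains.py | _find_ignore_marker_before
-- ===== SOURCE A (Python) =====
-- _IGNORE_MARKER = '<!-- doctor-ignore: verb-check -->'
--
-- def _find_ignore_marker_before(lines: list[str], fence_idx: int) -> bool:
--     """Return ``True`` if an ignore marker precedes the fence at ``fence_idx``.
--
--     The marker must appear on a line before the fence with only
--     whitespace-only lines (if any) between it and the opening fence.
--     """
--     idx = fence_idx - 1
--     while idx >= 0:
--         stripped = lines[idx].strip()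
--         if not stripped:
--             idx -= 1
--             continue
--         return stripped == _IGNORE_MARKER
--     return False
-- ===== SOURCE B (Python) =====
-- _IGNORE_MARKER = '<!-- doctor-ignore: verb-check -->'
--
-- def _find_ignore_marker_before(lines: list[str], fence_idx: int) -> bool:
--     """Forward single pass: remember the last non-blank line before the fence,
--     then compare its stripped form to the marker once at the end."""
--     last = None
--     for idx in range(fence_idx):
--         line = lines[idx]
--         if line and not line.isspace():
--             last = line
--     return last is not None and last.strip() == _IGNORE_MARKER
-- ===== Notes on version B (the rewrite author's own statement) =====
-- stated objective: alternative
-- what changed: Backward early-exit scan from the fence replaced by a forward single pass that tracks the last non-blank line before the fence and compares it to the marker once at the end.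
import Mathlib
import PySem

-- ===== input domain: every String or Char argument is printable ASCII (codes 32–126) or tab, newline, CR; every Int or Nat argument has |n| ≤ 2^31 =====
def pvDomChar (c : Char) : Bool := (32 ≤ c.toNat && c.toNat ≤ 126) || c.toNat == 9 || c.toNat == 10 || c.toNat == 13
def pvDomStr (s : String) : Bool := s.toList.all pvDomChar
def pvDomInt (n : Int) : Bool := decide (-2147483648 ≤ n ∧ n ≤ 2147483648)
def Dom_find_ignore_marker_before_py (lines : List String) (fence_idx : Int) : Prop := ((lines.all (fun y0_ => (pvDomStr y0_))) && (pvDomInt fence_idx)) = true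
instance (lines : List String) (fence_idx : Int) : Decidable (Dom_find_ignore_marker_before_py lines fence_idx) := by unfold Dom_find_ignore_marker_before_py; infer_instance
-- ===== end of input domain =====

-- B replaces A's backward early-exit scan by a forward single pass that remembers the last
-- non-blank line before the fence and strips/compares it once at the end (objective: alternative).

-- ===== PORT A =====
-- A's while loop: idx runs fence_idx-1, fence_idx-2, …, 0; n below is idx+1 (number of
-- remaining candidate lines), so the loop is structural recursion on n.
def pvAloop (lines : List String) : Nat → Bool
  | 0 => false
  | n + 1 =>
    match PySem.List.pyGet? lines (n : Int) with
    | none => false   -- IndexError in Python; excluded by Pre_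
    | some line =>
      let stripped := PySem.Str.strip line
      if stripped = "" then pvAloop lines n
      else decide (stripped = "<!-- doctor-ignore: verb-check -->")

def find_ignore_marker_before_py (lines : List String) (fence_idx : Int) : Bool :=
  pvAloop lines fence_idx.toNat

-- ===== PORT B =====
-- loop body: line = lines[idx]; if line and not line.isspace(): last = line
def pvBstep (lines : List String) (last : Option String) (idx : Nat) : Option String :=
  match PySem.List.pyGet? lines (idx : Int) with
  | none => last   -- IndexError in Python; excluded by Pre_
  | some line =>
    if line = "" || PySem.Str.strIsspace line then last else some line

-- range(fence_idx) ported as List.range fence_idx.toNat: empty for fence_idx ≤ 0, exactly Python's range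
def find_ignore_marker_before_py_alt (lines : List String) (fence_idx : Int) : Bool :=
  match (List.range fence_idx.toNat).foldl (pvBstep lines) none with
  | none => false   -- last is None
  | some last => decide (PySem.Str.strip last = "<!-- doctor-ignore: verb-check -->")

-- ===== PRECONDITION & SPEC =====
-- A raises IndexError exactly when fence_idx - 1 ≥ len(lines) (its first access is out of range)
def Pre_find_ignore_marker_before_py (lines : List String) (fence_idx : Int) : Prop :=
  fence_idx ≤ (lines.length : Int)
instance (lines : List String) (fence_idx : Int) : Decidable (Pre_find_ignore_marker_before_py lines fence_idx) := by unfold Pre_find_ignore_marker_before_py; infer_instance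

def pvWitness_find_ignore_marker_before_py : List String × Int :=
  (["<!-- doctor-ignore: verb-check -->", "  ", "```text"], 2)

def Spec_find_ignore_marker_before_py (lines : List String) (fence_idx : Int) (out : Bool) : Prop := out = find_ignore_marker_before_py_alt lines fence_idx
instance (lines : List String) (fence_idx : Int) (out : Bool) : Decidable (Spec_find_ignore_marker_before_py lines fence_idx out) := by unfold Spec_find_ignore_marker_before_py; infer_instance

-- ===== CLAIM (what is proved, stated in full; the proofs are below) =====
def Claim_equal_find_ignore_marker_before_py : Prop := ∀ (lines : List String) (fence_idx : Int), Dom_find_ignore_marker_before_py lines fence_idx → Pre_find_ignore_marker_before_py lines fence_idx → Spec_find_ignore_marker_before_py lines fence_idx (find_ignore_marker_before_py lines fence_idx)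

-- ===== LEMMAS AND PROOFS =====

theorem pvWitness_ok : Dom_find_ignore_marker_before_py (pvWitness_find_ignore_marker_before_py.1) (pvWitness_find_ignore_marker_before_py.2) ∧ Pre_find_ignore_marker_before_py (pvWitness_find_ignore_marker_before_py.1) (pvWitness_find_ignore_marker_before_py.2) := by
  constructor <;> decide

-- a list all of whose dropWhile-survivors satisfy p is all-p (the dropped prefix satisfies p by construction)
theorem pv_all_dropWhile (p : Char → Bool) (l : List Char) :
    (∀ x ∈ l.dropWhile p, p x = true) ↔ (∀ x ∈ l, p x = true) := by
  constructor
  · intro h x hx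
    rw [← List.takeWhile_append_dropWhile (p := p) (l := l)] at hx
    rcases List.mem_append.mp hx with h1 | h2
    · exact List.mem_takeWhile_imp h1
    · exact h x h2
  · intro h x hx
    exact h x ((List.dropWhile_sublist (l := l) (p := p)).subset hx)

-- Python: s.strip() == ''  ⟺  every character of s is whitespace
theorem pv_strip_eq_empty_iff (s : String) :
    (PySem.Str.strip s = "") ↔ (∀ c ∈ s.toList, PySem.Chars.isspace c = true) := by
  unfold PySem.Str.strip PySem.Chars.strip PySem.Chars.rstrip PySem.Chars.lstrip
  rw [show ∀ cs : List Char, (String.ofList cs = "") ↔ cs = [] from fun cs =>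
    ⟨fun h => by simpa using congrArg String.toList h, fun h => by simp [h]⟩]
  rw [List.reverse_eq_nil_iff, List.dropWhile_eq_nil_iff]
  constructor
  · intro h
    rw [← pv_all_dropWhile PySem.Chars.isspace s.toList]
    intro x hx
    exact h x (by simpa using hx)
  · intro h x hx
    exact ((pv_all_dropWhile PySem.Chars.isspace s.toList).mpr h) x (by simpa using hx)

-- B's blankness test agrees with A's: line == '' or line.isspace()  ⟺  line.strip() == ''
theorem pv_blank_iff (line : String) :
    (line = "" || PySem.Str.strIsspace line) = true ↔ PySem.Str.strip line = "" := by
  rw [pv_strip_eq_empty_iff]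
  unfold PySem.Str.strIsspace PySem.Chars.strIsspace
  rcases h : line.toList with _ | ⟨c, cs⟩
  · constructor
    · intro _ x hx
      simp at hx
    · intro _
      simp only [Bool.or_eq_true, decide_eq_true_eq]
      left
      simpa using congrArg String.ofList h
  · constructor
    · intro hb x hx
      simp only [Bool.or_eq_true, decide_eq_true_eq, Bool.and_eq_true, List.all_eq_true] at hb
      rcases hb with hb | ⟨_, hall⟩
      · exact absurd (congrArg String.toList hb) (by simp [h])
      · exact hall x hx
    · intro hall
      simp only [Bool.or_eq_true, decide_eq_true_eq, Bool.and_eq_true, List.all_eq_true]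
      right
      exact ⟨by simp, hall⟩

-- evaluate B's fold result through A's notion of the marker test
def pvTest (last : Option String) : Bool :=
  match last with
  | none => false
  | some l => decide (PySem.Str.strip l = "<!-- doctor-ignore: verb-check -->")

-- core invariant: A's backward scan over the first n lines equals the marker test of
-- B's forward fold over the same n lines
theorem pvAloop_eq_fold (lines : List String) (n : Nat) (hn : n ≤ lines.length) :
    pvAloop lines n = pvTest ((List.range n).foldl (pvBstep lines) none) := by
  induction n with
  | zero => simp [pvAloop, pvTest]
  | succ m ih =>
    have hm : m < lines.length := hn
    have hget : PySem.List.pyGet? lines (m : Int) = some lines[m] :=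
      PySem.List.pyGet?_ofNat lines m hm
    rw [pvAloop, List.range_succ, List.foldl_append, List.foldl_cons, List.foldl_nil]
    simp only [pvBstep, hget]
    by_cases hs : PySem.Str.strip lines[m] = ""
    · rw [if_pos hs, if_pos ((pv_blank_iff lines[m]).mpr hs)]
      exact ih (Nat.le_of_lt hm)
    · rw [if_neg hs, if_neg (fun hb => hs ((pv_blank_iff lines[m]).mp hb))]
      simp [pvTest]

-- ===== VERDICT (by name: the statement is the Claim_ definition above) =====
theorem find_ignore_marker_before_py_spec : Claim_equal_find_ignore_marker_before_py := by
  intro lines fence_idx _ hpre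
  unfold Pre_find_ignore_marker_before_py at hpre
  unfold Spec_find_ignore_marker_before_py find_ignore_marker_before_py find_ignore_marker_before_py_alt
  rw [pvAloop_eq_fold lines fence_idx.toNat (by omega)]
  rfl
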